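-- pv_equiv track=rewrite | github.com/cantabile1129/Choir-singing-with-AI | audiofiles_switching/audio_copybyname_Jin.py | parse_synthv_threeparams
-- ===== SOURCE A (Python) =====
-- def parse_synthv_threeparams(stem):
--     """
--     ファイル名から prefix, A, B, vib を抽出する。
--     例：
--         concone_synthesizerV_KevinAI_1_1_3_MixDown
--         → prefix="concone_synthesizerV_KevinAI"
--           A=1, B=1, vib=3
--     """
--     parts = stem.split("_")
--
--     # 数字の場所を拾う
--     numeric_indices = []
--     for i, p in enumerate(parts):
--         try:
--             int(p)
--             numeric_indices.append(i)
--         except: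
--             pass
--
--     if len(numeric_indices) < 3:
--         raise ValueError(f"File name does not contain 3 numeric parts: {stem}")
--
--     # 最後の3つが A, B, vib
--     A_idx, B_idx, vib_idx = numeric_indices[-3:]
--
--     A = int(parts[A_idx])
--     B = int(parts[B_idx])
--     vib = int(parts[vib_idx])
--
--     prefix = "_".join(parts[:A_idx])
--     return prefix, A, B, vib
-- ===== SOURCE B (Python) =====
-- def parse_synthv_threeparams(stem):
--     """Reverse scan: walk parts from the end and return as soon as the last
--     three numeric tokens are found (early exit instead of a full forward pass)."""
--     parts = stem.split("_")
--     vib_idx = B_idx = None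
--     for i in range(len(parts) - 1, -1, -1):
--         try:
--             int(parts[i])
--         except ValueError:
--             continue
--         if vib_idx is None:
--             vib_idx = i
--         elif B_idx is None:
--             B_idx = i
--         else:  # i is the third numeric index from the end = A_idx
--             return ("_".join(parts[:i]), int(parts[i]),
--                     int(parts[B_idx]), int(parts[vib_idx]))
--     raise ValueError(f"File name does not contain 3 numeric parts: {stem}")
-- ===== Notes on version B (the rewrite author's own statement) =====
-- stated objective: alternative
-- what changed: Replaces the full forward enumerate-and-collect of all numeric indices followed by a [-3:] slice with a backward scan over the tokens that stops as soon as the last three numeric tokens are found.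
import Mathlib
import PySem

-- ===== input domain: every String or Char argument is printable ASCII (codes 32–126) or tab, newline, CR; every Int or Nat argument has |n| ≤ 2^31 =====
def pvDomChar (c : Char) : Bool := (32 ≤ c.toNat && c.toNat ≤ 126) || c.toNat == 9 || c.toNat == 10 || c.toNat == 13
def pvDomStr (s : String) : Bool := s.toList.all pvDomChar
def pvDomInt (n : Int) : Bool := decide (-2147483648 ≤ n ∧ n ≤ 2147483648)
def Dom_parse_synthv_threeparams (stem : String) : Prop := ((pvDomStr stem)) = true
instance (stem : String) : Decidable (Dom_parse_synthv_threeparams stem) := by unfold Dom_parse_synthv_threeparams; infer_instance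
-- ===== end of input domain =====

-- B replaces A's full forward collection of all numeric indices (then a [-3:] slice)
-- by a backward scan of the tokens that stops at the third numeric token from the end.

-- ===== PORT A =====
-- A: split on "_", collect every index whose token parses as int, take the last three.
def parse_synthv_threeparams (stem : String) : String × Int × Int × Int :=
  let parts := (PySem.Str.split? stem "_").getD []
  let numericIndices :=
    (PySem.List.enumerate parts).foldl
      (fun acc ip => if (PySem.Int.ofStr? ip.2).isSome then acc ++ [ip.1] else acc) []
  if numericIndices.length < 3 then ("", 0, 0, 0)  -- Python raises ValueError here: outside Pre_
  else
    match PySem.List.slice numericIndices (some (-3)) none with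
    | [aIdx, bIdx, vibIdx] =>
        (PySem.Str.join "_" (PySem.List.slice parts none (some aIdx)),
         (PySem.Int.ofStr? (PySem.List.pyGetD parts aIdx "")).getD 0,
         (PySem.Int.ofStr? (PySem.List.pyGetD parts bIdx "")).getD 0,
         (PySem.Int.ofStr? (PySem.List.pyGetD parts vibIdx "")).getD 0)
    | _ => ("", 0, 0, 0)  -- unreachable: a [-3:] slice of a list of length ≥ 3 has length 3

-- ===== PORT B =====
-- B's loop: walk the (index, token) pairs back to front, remembering the first two
-- numeric indices seen (vib_idx then B_idx); the third one is A_idx: return.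
def pvRevLoop : List (Int × String) → Option Int → Option Int → Option (Int × Int × Int)
  | [], _, _ => none
  | ip :: rest, vib?, b? =>
    if (PySem.Int.ofStr? ip.2).isSome then
      match vib?, b? with
      | none, _ => pvRevLoop rest (some ip.1) b?
      | some _, none => pvRevLoop rest vib? (some ip.1)
      | some v, some b => some (ip.1, b, v)
    else pvRevLoop rest vib? b?

def parse_synthv_threeparams_alt (stem : String) : String × Int × Int × Int :=
  let parts := (PySem.Str.split? stem "_").getD []
  match pvRevLoop (PySem.List.enumerate parts).reverse none none with
  | some (aIdx, bIdx, vibIdx) =>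
      (PySem.Str.join "_" (PySem.List.slice parts none (some aIdx)),
       (PySem.Int.ofStr? (PySem.List.pyGetD parts aIdx "")).getD 0,
       (PySem.Int.ofStr? (PySem.List.pyGetD parts bIdx "")).getD 0,
       (PySem.Int.ofStr? (PySem.List.pyGetD parts vibIdx "")).getD 0)
  | none => ("", 0, 0, 0)  -- Python raises ValueError here: outside Pre_

-- ===== PRECONDITION & SPEC =====
-- Pre_ excludes exactly the stems with fewer than three int-parsable "_"-tokens,
-- on which both A and B raise ValueError.
def Pre_parse_synthv_threeparams (stem : String) : Prop :=
  3 ≤ (((PySem.Str.split? stem "_").getD []).filter (fun p => (PySem.Int.ofStr? p).isSome)).length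
instance (stem : String) : Decidable (Pre_parse_synthv_threeparams stem) := by
  unfold Pre_parse_synthv_threeparams; infer_instance

def pvWitness_parse_synthv_threeparams : String := "concone_KevinAI_1_1_3_MixDown"

def Spec_parse_synthv_threeparams (stem : String) (out : String × Int × Int × Int) : Prop := out = parse_synthv_threeparams_alt stem
instance (stem : String) (out : String × Int × Int × Int) : Decidable (Spec_parse_synthv_threeparams stem out) := by unfold Spec_parse_synthv_threeparams; infer_instance

-- ===== CLAIM (what is proved, stated in full; the proofs are below) =====
def Claim_equal_parse_synthv_threeparams : Prop := ∀ (stem : String), Dom_parse_synthv_threeparams stem → Pre_parse_synthv_threeparams stem → Spec_parse_synthv_threeparams stem (parse_synthv_threeparams stem)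

-- ===== LEMMAS AND PROOFS =====

-- counting numeric tokens through enumerate
theorem pvLen_filter_enumerate (q : String → Bool) :
    ∀ (xs : List String) (s : Int),
      ((PySem.List.enumerate xs s).filter (fun ip => q ip.2)).length = (xs.filter q).length := by
  intro xs
  induction xs with
  | nil => intro s; simp [PySem.List.enumerate_nil]
  | cons x xs ih =>
    intro s
    simp only [PySem.List.enumerate_cons, List.filter_cons]
    by_cases h : q x <;> simp [h, ih]

-- characterisation of B's backward loop (state (vib?, b?) read as the list of indices found so far)
theorem pvRevLoop_eq (l : List (Int × String)) :
    ∀ (vib? b? : Option Int), (b?.isSome → vib?.isSome) →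
      pvRevLoop l vib? b? =
        (match (vib?.toList ++ b?.toList) ++ (l.filter (fun ip => (PySem.Int.ofStr? ip.2).isSome)).map (·.1) with
         | v :: b :: a :: _ => some (a, b, v)
         | _ => none) := by
  induction l with
  | nil =>
    intro vib? b? h
    match vib?, b?, h with
    | none, none, _ => simp [pvRevLoop]
    | some v, none, _ => simp [pvRevLoop]
    | some v, some b, _ => simp [pvRevLoop]
    | none, some b, h => exact absurd (h rfl) (by simp)
  | cons ip rest ih =>
    intro vib? b? h
    by_cases hn : (PySem.Int.ofStr? ip.2).isSome
    · match vib?, b?, h with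
      | none, none, _ => simpa [pvRevLoop, hn] using ih (some ip.1) none (by simp)
      | some v, none, _ => simpa [pvRevLoop, hn] using ih (some v) (some ip.1) (by simp)
      | some v, some b, _ => simp [pvRevLoop, hn]
      | none, some b, h => exact absurd (h rfl) (by simp)
    · simpa [pvRevLoop, hn] using ih vib? b? h

theorem parse_spec_aux (stem : String) (h : Pre_parse_synthv_threeparams stem) :
    parse_synthv_threeparams stem = parse_synthv_threeparams_alt stem := by
  unfold Pre_parse_synthv_threeparams at h
  unfold parse_synthv_threeparams parse_synthv_threeparams_alt
  set parts := (PySem.Str.split? stem "_").getD [] with hparts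
  set q : Int × String → Bool := fun ip => (PySem.Int.ofStr? ip.2).isSome with hq
  have hfold :
      (PySem.List.enumerate parts).foldl
        (fun acc ip => if (PySem.Int.ofStr? ip.2).isSome then acc ++ [ip.1] else acc) [] =
      ((PySem.List.enumerate parts).filter q).map (·.1) := by
    simpa [hq] using
      PySem.List.foldl_append_if (l := PySem.List.enumerate parts)
        (p := q) (f := (·.1)) (acc := [])
  set nums := ((PySem.List.enumerate parts).filter q).map (·.1) with hnums
  have hlen : 3 ≤ nums.length := by
    have := pvLen_filter_enumerate (fun p => (PySem.Int.ofStr? p).isSome) parts 0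
    simp only [hnums, List.length_map, hq]
    omega
  -- decompose nums from the back
  have hrev3 : 3 ≤ nums.reverse.length := by simpa using hlen
  obtain ⟨v, b, a, t, hr⟩ : ∃ v b a t, nums.reverse = v :: b :: a :: t := by
    match hm : nums.reverse, hrev3 with
    | v :: b :: a :: t, _ => exact ⟨v, b, a, t, rfl⟩
  have hnumsdec : nums = t.reverse ++ [a, b, v] := by
    have := congrArg List.reverse hr
    simpa using this
  -- B's loop result
  have hloop : pvRevLoop (PySem.List.enumerate parts).reverse none none = some (a, b, v) := by
    rw [pvRevLoop_eq _ none none (by simp)]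
    have : ((PySem.List.enumerate parts).reverse.filter q).map (·.1) = nums.reverse := by
      simp [hnums, List.filter_reverse, List.map_reverse]
    simp only [hq] at this ⊢
    rw [this, hr]
    simp
  -- A's slice result
  have hslice : PySem.List.slice nums (some (-3)) none = [a, b, v] := by
    rw [PySem.List.slice_from_neg_ofNat nums 3 (by omega), hnumsdec]
    have hlen' : (t.reverse ++ [a, b, v]).length - 3 = t.reverse.length := by
      simp
    rw [hlen', List.drop_left]
  have hif : ¬ nums.length < 3 := by omega
  simp only [hfold, hloop, hslice, if_neg hif]

-- ===== VERDICT (by name: the statement is the Claim_ definition above) =====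
theorem parse_synthv_threeparams_spec : Claim_equal_parse_synthv_threeparams := by
  intro stem _ hpre
  unfold Spec_parse_synthv_threeparams
  exact (parse_spec_aux stem hpre)
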